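-- pv_equiv track=rewrite | github.com/miliar/Code_Jam_Webscraper | solutions_python/solutions_year15_round0_nr1/2231.py | minimum_guests
-- ===== SOURCE A (Python) =====
-- def minimum_guests(test):
--     shyness = 0
--     audience = 0
--     guests = 0
--     for digit in test:
--         if digit > 0:
--             if shyness > audience + guests:
--                 guests += shyness - (audience + guests)
--             audience += int(digit)
--         shyness += 1
--     return guests
-- ===== SOURCE B (Python) =====
-- def minimum_guests(test):
--     # pass 1: prefix[i] = total audience (positive counts) before level i
--     prefix = []
--     p = 0
--     for d in test:
--         prefix.append(p)
--         if d > 0: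
--             p += d
--     # pass 2: running maximum deficit i - prefix[i] over nonzero levels
--     best = 0
--     i = 0
--     for d, pb in zip(test, prefix):
--         if d > 0:
--             best = max(best, i - pb)
--         i += 1
--     return max(0, best)
-- ===== Notes on version B (the rewrite author's own statement) =====
-- stated objective: alternative
-- what changed: Replaces A's single stateful greedy loop (adding friends on the fly) with a two-pass formulation: build a prefix-sum table of audience counts, then take the running maximum deficit i - prefix[i] over positive levels, floored at 0.
import Mathlib
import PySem

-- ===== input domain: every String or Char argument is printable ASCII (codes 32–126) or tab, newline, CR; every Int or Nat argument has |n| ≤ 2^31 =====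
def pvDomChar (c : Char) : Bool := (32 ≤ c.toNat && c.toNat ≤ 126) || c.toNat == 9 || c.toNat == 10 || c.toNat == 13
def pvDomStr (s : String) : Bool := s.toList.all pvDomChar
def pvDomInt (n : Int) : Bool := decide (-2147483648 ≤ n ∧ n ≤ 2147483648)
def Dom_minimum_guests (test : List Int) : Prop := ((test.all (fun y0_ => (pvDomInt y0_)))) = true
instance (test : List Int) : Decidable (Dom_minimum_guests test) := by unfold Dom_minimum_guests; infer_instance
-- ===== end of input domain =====

-- B is an alternative two-pass formulation (prefix-sum table + running max deficit) of A's
-- one-pass greedy; equivalence of the RETURN value on all inputs is proved below.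

-- ===== PORT A =====
-- state = (shyness, audience, guests), exactly A's three loop variables
def minimum_guests (test : List Int) : Int :=
  (test.foldl
    (fun (s : Int × Int × Int) digit =>
      let shyness := s.1; let audience := s.2.1; let guests := s.2.2
      if digit > 0 then
        let guests :=
          if shyness > audience + guests then
            guests + (shyness - (audience + guests))
          else guests
        (shyness + 1, audience + digit, guests)
      else
        (shyness + 1, audience, guests))
    (0, 0, 0)).2.2

-- ===== PORT B =====
def minimum_guests_alt (test : List Int) : Int :=
  -- pass 1: prefix[i] = total audience (positive counts) before level i
  let pref :=
    (test.foldl (fun (s : List Int × Int) d =>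
        (s.1 ++ [s.2], if d > 0 then s.2 + d else s.2)) ([], 0)).1
  -- pass 2: running maximum deficit i - prefix[i] over positive levels
  let best :=
    ((test.zip pref).foldl
      (fun (s : Int × Int) dp =>
        (s.1 + 1, if dp.1 > 0 then max s.2 (s.1 - dp.2) else s.2)) (0, 0)).2
  max 0 best

-- ===== PRECONDITION & SPEC =====
def Spec_minimum_guests (test : List Int) (out : Int) : Prop := out = minimum_guests_alt test
instance (test : List Int) (out : Int) : Decidable (Spec_minimum_guests test out) := by unfold Spec_minimum_guests; infer_instance

-- ===== CLAIM (what is proved, stated in full; the proofs are below) =====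
def Claim_equal_minimum_guests : Prop := ∀ (test : List Int), Dom_minimum_guests test → Spec_minimum_guests test (minimum_guests test)

-- ===== LEMMAS AND PROOFS =====

-- reference recursion shared by both proofs: running max of deficits
def mgRef (l : List Int) (k p b : Int) : Int :=
  match l with
  | [] => b
  | d :: l =>
      if d > 0 then mgRef l (k + 1) (p + d) (max b (k - p))
      else mgRef l (k + 1) p b

-- prefix table of B, recursively
def mgPref (l : List Int) (p : Int) : List Int :=
  match l with
  | [] => []
  | d :: l => p :: mgPref l (if d > 0 then p + d else p)

theorem mgRef_le (l : List Int) (k p b : Int) : b ≤ mgRef l k p b := by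
  induction l generalizing k p b with
  | nil => simp [mgRef]
  | cons d l ih =>
      simp only [mgRef]
      split
      · exact le_trans (le_max_left _ _) (ih _ _ _)
      · exact ih _ _ _

theorem foldA_eq (l : List Int) (k p b : Int) :
    (l.foldl
      (fun (s : Int × Int × Int) digit =>
        let shyness := s.1; let audience := s.2.1; let guests := s.2.2
        if digit > 0 then
          let guests :=
            if shyness > audience + guests then
              guests + (shyness - (audience + guests))
            else guests
          (shyness + 1, audience + digit, guests)
        else
          (shyness + 1, audience, guests))
      (k, p, b)).2.2 = mgRef l k p b := by
  induction l generalizing k p b with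
  | nil => simp [mgRef]
  | cons d l ih =>
      simp only [List.foldl, mgRef]
      by_cases hd : d > 0
      · simp only [hd, if_pos]
        rw [ih]
        congr 1
        by_cases hc : k > p + b
        · rw [if_pos hc]; omega
        · rw [if_neg hc]; omega
      · simp only [hd, if_false]
        exact ih _ _ _

theorem foldPref_eq (l : List Int) (acc : List Int) (p : Int) :
    (l.foldl (fun (s : List Int × Int) d =>
        (s.1 ++ [s.2], if d > 0 then s.2 + d else s.2)) (acc, p)).1
      = acc ++ mgPref l p := by
  induction l generalizing acc p with
  | nil => simp [mgPref]
  | cons d l ih =>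
      simp only [List.foldl, mgPref]
      rw [ih]
      simp

theorem foldB_eq (l : List Int) (k p b : Int) :
    ((l.zip (mgPref l p)).foldl
      (fun (s : Int × Int) dp =>
        (s.1 + 1, if dp.1 > 0 then max s.2 (s.1 - dp.2) else s.2)) (k, b)).2
      = mgRef l k p b := by
  induction l generalizing k p b with
  | nil => simp [mgRef, mgPref]
  | cons d l ih =>
      simp only [mgPref, List.zip, List.zipWith, List.foldl, mgRef]
      by_cases hd : d > 0
      · simp only [hd, if_pos]
        exact ih _ _ _
      · simp only [hd, if_false]
        exact ih _ _ _

-- ===== VERDICT (by name: the statement is the Claim_ definition above) =====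
theorem minimum_guests_spec : Claim_equal_minimum_guests := by
  intro test _
  unfold Spec_minimum_guests minimum_guests minimum_guests_alt
  rw [foldA_eq]
  have hp := foldPref_eq test [] 0
  simp only [List.nil_append] at hp
  simp only [hp, foldB_eq]
  have := mgRef_le test 0 0 0
  omega
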